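-- pv_equiv track=rewrite | github.com/hardik0703/si507_project_final | search_functions.py | do_sanity_count_check
-- ===== SOURCE A (Python) =====
-- def do_sanity_count_check(search_tree):
--     '''
--     This function does a sanity check on the search tree to make sure that
--     the total number of cities in the tree is correct.
--
--     Parameters:
--     search_tree (dict): a nested dictionary that represents the search tree
--
--     Returns:
--     None
--     '''
--     count = 0
--     for price_bucket in search_tree.values():
--         for crime_bucket in price_bucket.values():
--             for summer_temp_bucket in crime_bucket.values():
--                 for winter_temp_bucket in summer_temp_bucket.values():
--                     count += len(winter_temp_bucket)
--     return f'Sanity check: total number of cities in the search tree is {count}'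
-- ===== SOURCE B (Python) =====
-- def _count(node):
--     if isinstance(node, dict):
--         return sum(_count(v) for v in node.values())
--     return len(node)
--
--
-- def do_sanity_count_check(search_tree):
--     count = _count(search_tree)
--     return f'Sanity check: total number of cities in the search tree is {count}'
-- ===== Notes on version B (the rewrite author's own statement) =====
-- stated objective: simpler
-- what changed: Replaces the fixed 4-deep nest of for-loops with a self-similar recursive helper that sums over dict values and takes len at list leaves.
import Mathlib
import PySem

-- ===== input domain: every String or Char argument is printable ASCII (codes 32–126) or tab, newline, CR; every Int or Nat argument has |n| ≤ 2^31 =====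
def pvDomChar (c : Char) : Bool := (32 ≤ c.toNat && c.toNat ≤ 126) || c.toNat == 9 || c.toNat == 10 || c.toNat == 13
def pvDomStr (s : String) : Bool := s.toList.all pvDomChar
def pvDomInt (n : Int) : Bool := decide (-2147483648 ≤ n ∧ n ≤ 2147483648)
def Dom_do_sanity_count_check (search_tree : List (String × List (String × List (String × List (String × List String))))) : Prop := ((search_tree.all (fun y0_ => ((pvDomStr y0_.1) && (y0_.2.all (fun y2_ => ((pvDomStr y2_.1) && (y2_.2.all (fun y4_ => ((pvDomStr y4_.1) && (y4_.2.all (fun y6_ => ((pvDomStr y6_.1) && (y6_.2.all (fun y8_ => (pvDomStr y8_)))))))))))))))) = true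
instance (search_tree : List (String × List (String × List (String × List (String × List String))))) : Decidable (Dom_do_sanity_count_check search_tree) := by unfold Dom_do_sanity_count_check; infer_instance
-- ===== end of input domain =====

-- B replaces A's fixed 4-deep loop nest with per-level recursive summing helpers (simpler decomposition, same cost).

-- ===== PORT A =====
-- A: four nested for-loops accumulating `count`, then the f-string.
def do_sanity_count_check (search_tree : List (String × List (String × List (String × List (String × List String))))) : String :=
  let count : Int :=
    search_tree.foldl (fun c price_bucket =>
      price_bucket.2.foldl (fun c crime_bucket =>
        crime_bucket.2.foldl (fun c summer_temp_bucket =>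
          summer_temp_bucket.2.foldl (fun c winter_temp_bucket =>
            c + (winter_temp_bucket.2.length : Int)) c) c) c) 0
  "Sanity check: total number of cities in the search tree is " ++ PySem.Int.toStr count

-- ===== PORT B =====
-- B's generic recursion `_count` (dict → sum over values, leaf list → len), instantiated at each level of the tree type.
def pvCnt1 (node : List String) : Int := node.length
def pvCnt2 (node : List (String × List String)) : Int := (node.map (fun kv => pvCnt1 kv.2)).sum
def pvCnt3 (node : List (String × List (String × List String))) : Int := (node.map (fun kv => pvCnt2 kv.2)).sum
def pvCnt4 (node : List (String × List (String × List (String × List String)))) : Int := (node.map (fun kv => pvCnt3 kv.2)).sum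
def pvCnt5 (node : List (String × List (String × List (String × List (String × List String))))) : Int := (node.map (fun kv => pvCnt4 kv.2)).sum

def do_sanity_count_check_alt (search_tree : List (String × List (String × List (String × List (String × List String))))) : String :=
  "Sanity check: total number of cities in the search tree is " ++ PySem.Int.toStr (pvCnt5 search_tree)

-- ===== PRECONDITION & SPEC =====
def Spec_do_sanity_count_check (search_tree : List (String × List (String × List (String × List (String × List String))))) (out : String) : Prop := out = do_sanity_count_check_alt search_tree
instance (search_tree : List (String × List (String × List (String × List (String × List String))))) (out : String) : Decidable (Spec_do_sanity_count_check search_tree out) := by unfold Spec_do_sanity_count_check; infer_instance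

-- ===== CLAIM (what is proved, stated in full; the proofs are below) =====
def Claim_equal_do_sanity_count_check : Prop := ∀ (search_tree : List (String × List (String × List (String × List (String × List String))))), Dom_do_sanity_count_check search_tree → Spec_do_sanity_count_check search_tree (do_sanity_count_check search_tree)

-- ===== LEMMAS AND PROOFS =====

theorem foldl2_eq (l : List (String × List String)) (a : Int) :
    l.foldl (fun c wb => c + (wb.2.length : Int)) a = a + pvCnt2 l := by
  simpa [pvCnt2, pvCnt1] using PySem.List.foldl_add (fun wb : String × List String => (wb.2.length : Int)) (l := l) (a := a)

theorem foldl3_eq (l : List (String × List (String × List String))) (a : Int) :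
    l.foldl (fun c sb => sb.2.foldl (fun c wb => c + (wb.2.length : Int)) c) a = a + pvCnt3 l := by
  simp only [foldl2_eq]
  rw [PySem.List.foldl_add]; rfl

theorem foldl4_eq (l : List (String × List (String × List (String × List String)))) (a : Int) :
    l.foldl (fun c cb => cb.2.foldl (fun c sb => sb.2.foldl (fun c wb => c + (wb.2.length : Int)) c) c) a = a + pvCnt4 l := by
  simp only [foldl3_eq]
  rw [PySem.List.foldl_add]; rfl

theorem foldl5_eq (l : List (String × List (String × List (String × List (String × List String))))) (a : Int) :
    l.foldl (fun c pb => pb.2.foldl (fun c cb => cb.2.foldl (fun c sb => sb.2.foldl (fun c wb => c + (wb.2.length : Int)) c) c) c) a = a + pvCnt5 l := by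
  simp only [foldl4_eq]
  rw [PySem.List.foldl_add]; rfl

-- ===== VERDICT (by name: the statement is the Claim_ definition above) =====
theorem do_sanity_count_check_spec : Claim_equal_do_sanity_count_check := by
  intro t _
  unfold Spec_do_sanity_count_check do_sanity_count_check do_sanity_count_check_alt
  rw [foldl5_eq]
  simp
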